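-- pv_equiv track=rewrite | github.com/alegottu/gawk-trees | tools/convert/convert.py | valid_token
-- ===== SOURCE A (Python) =====
-- def valid_token(substr: str, statement: str) -> bool:
--     i = statement.find(substr)
--     quote_start = statement.find('"')
--
--     if i == -1:
--         return False
--     elif quote_start == -1:
--         return True
--     else:
--         quote_end = statement.find('"', quote_start+1)
--         while quote_start != -1 and quote_end != -1:
--             if i > quote_start and i < quote_end: return False
--             quote_start = statement.find('"', quote_end+1)
--             quote_end = statement.find('"', quote_start+1)
--
--     return True
-- ===== SOURCE B (Python) =====
-- def _outside(i, qs):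
--     # True iff i does not fall strictly inside any consecutive quote pair.
--     if len(qs) < 2:
--         return True
--     if qs[0] < i < qs[1]:
--         return False
--     return _outside(i, qs[2:])
--
--
-- def valid_token(substr: str, statement: str) -> bool:
--     i = statement.find(substr)
--     if i == -1:
--         return False
--     qs = [j for j, c in enumerate(statement) if c == '"']
--     return _outside(i, qs)
-- ===== Notes on version B (the rewrite author's own statement) =====
-- stated objective: simpler
-- what changed: B collects all quote positions once with a single enumerate pass and walks them two at a time, instead of A's while loop that restarts str.find twice per iteration to locate each quote pair.
import Mathlib
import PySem

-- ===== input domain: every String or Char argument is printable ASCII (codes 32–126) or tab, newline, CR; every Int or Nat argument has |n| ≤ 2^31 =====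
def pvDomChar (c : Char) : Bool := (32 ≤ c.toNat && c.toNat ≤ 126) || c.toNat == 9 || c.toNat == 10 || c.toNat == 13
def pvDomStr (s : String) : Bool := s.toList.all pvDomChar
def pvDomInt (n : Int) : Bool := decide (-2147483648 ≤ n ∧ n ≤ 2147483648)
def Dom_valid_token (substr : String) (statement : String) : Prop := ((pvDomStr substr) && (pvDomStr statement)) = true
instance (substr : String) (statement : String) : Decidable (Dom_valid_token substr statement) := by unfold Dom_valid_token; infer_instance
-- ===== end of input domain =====

-- B indexes all quote positions in one enumerate pass and scans them pairwise, replacing A's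
-- while loop of resumed str.find calls; objective: simpler decomposition, same asymptotic cost.


-- ===== PORT A =====
-- A's while loop: state (quote_start, quote_end); fuel only makes the recursion total
-- (each continuing iteration moves quote_end forward, so length+1 steps always suffice).
def vtLoopA (statement : String) (i : Int) : Nat → Int → Int → Bool
  | 0, _, _ => true
  | fuel+1, quote_start, quote_end =>
    if quote_start ≠ -1 ∧ quote_end ≠ -1 then
      if i > quote_start ∧ i < quote_end then false
      else
        let quote_start' := PySem.Str.findFrom statement "\"" (quote_end + 1)
        vtLoopA statement i fuel quote_start' (PySem.Str.findFrom statement "\"" (quote_start' + 1))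
    else true

def valid_token (substr : String) (statement : String) : Bool :=
  let i := PySem.Str.find statement substr
  let quote_start := PySem.Str.find statement "\""
  if i = -1 then false
  else if quote_start = -1 then true
  else
    let quote_end := PySem.Str.findFrom statement "\"" (quote_start + 1)
    vtLoopA statement i (statement.toList.length + 1) quote_start quote_end

-- ===== PORT B =====
-- B's recursive helper _outside: walk the quote positions two at a time.
def vtOutside (i : Int) : List Int → Bool
  | a :: b :: rest => if a < i ∧ i < b then false else vtOutside i rest
  | _ => true

-- B's comprehension: [j for j, c in enumerate(statement) if c == '"']
def quotePositions (l : List Char) : List Int :=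
  ((PySem.List.enumerate l).filter (fun p => p.2 == '"')).map (·.1)

def valid_token_alt (substr : String) (statement : String) : Bool :=
  let i := PySem.Str.find statement substr
  if i = -1 then false
  else vtOutside i (quotePositions statement.toList)

-- ===== PRECONDITION & SPEC =====
def Spec_valid_token (substr : String) (statement : String) (out : Bool) : Prop := out = valid_token_alt substr statement
instance (substr : String) (statement : String) (out : Bool) : Decidable (Spec_valid_token substr statement out) := by unfold Spec_valid_token; infer_instance

-- ===== CLAIM (what is proved, stated in full; the proofs are below) =====
def Claim_equal_valid_token : Prop := ∀ (substr : String) (statement : String), Dom_valid_token substr statement → Spec_valid_token substr statement (valid_token substr statement)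

-- ===== LEMMAS AND PROOFS =====

theorem mem_qpos {l : List Char} {x : Int} :
    x ∈ quotePositions l ↔ ∃ k : Nat, ∃ _ : k < l.length, x = (k : Int) ∧ l[k] = '"' := by
  simp only [quotePositions, List.mem_map, List.mem_filter, PySem.List.mem_enumerate_iff]
  constructor
  · rintro ⟨⟨a, c⟩, ⟨⟨k, hk, hp⟩, hc⟩, hx⟩
    cases hp
    exact ⟨k, hk, by simpa using hx.symm, by simpa using hc⟩
  · rintro ⟨k, hk, hx, hc⟩
    refine ⟨((k : Int), l[k]), ⟨⟨k, hk, by norm_num⟩, by simp [hc]⟩, hx.symm⟩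

theorem pairwise_qpos (l : List Char) : (quotePositions l).Pairwise (· < ·) := by
  unfold quotePositions
  exact List.pairwise_map.mpr ((PySem.List.pairwise_lt_enumerate l 0).filter _)

-- findFrom for the one-character needle '"' is the head of the ≥ k suffix of quotePositions.
theorem findFrom_qpos (l : List Char) (k : Nat) (hk : k ≤ l.length) :
    PySem.Chars.findFrom l ['"'] (k : Int) =
      ((quotePositions l).filter (fun j => decide ((k : Int) ≤ j))).headD (-1) := by
  rw [PySem.Chars.findFrom_natCast l ['"'] k hk]
  set f := PySem.Chars.find (List.drop k l) ['"'] with hf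
  by_cases h0 : f = -1
  · -- no quote at index ≥ k: the filter is empty
    have hnin : ¬ ['"'] <:+: List.drop k l := (PySem.Chars.find_eq_neg_one_iff _ _).mp h0
    have hfil : (quotePositions l).filter (fun j => decide ((k : Int) ≤ j)) = [] := by
      rw [List.filter_eq_nil_iff]
      rintro x hx hge
      obtain ⟨m, hm, rfl, hc⟩ := mem_qpos.mp hx
      have hkm : k ≤ m := by exact_mod_cast of_decide_eq_true hge
      apply hnin
      rw [List.singleton_infix_iff]
      have : (List.drop k l)[m - k]? = some '"' := by
        rw [List.getElem?_drop]
        have : k + (m - k) = m := by omega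
        rw [this, List.getElem?_eq_getElem hm, hc]
      exact List.mem_of_getElem? this
    simp [h0, hfil]
  · -- first quote at index ≥ k is at j := k + f.toNat
    have hpos : 0 ≤ f := by
      have := PySem.Chars.neg_one_le_find (List.drop k l) ['"']
      omega
    obtain ⟨hpre, hmin⟩ := PySem.Chars.find_spec (s := List.drop k l) (sub := ['"']) hpos
    set j : Nat := k + f.toNat with hj
    have hgetj : l[j]? = some '"' := by
      rw [List.drop_drop] at hpre
      obtain ⟨u, hu⟩ := hpre
      have := List.head?_drop (l := l) (i := j)
      rw [← hu] at this
      simpa using this.symm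
    have hjlt : j < l.length := by
      have := List.getElem?_eq_some_iff.mp hgetj
      exact this.1
    have hjmem : (j : Int) ∈ quotePositions l := by
      rw [mem_qpos]
      exact ⟨j, hjlt, rfl, by
        have := List.getElem?_eq_some_iff.mp hgetj
        exact this.2⟩
    have hjfil : (j : Int) ∈ (quotePositions l).filter (fun x => decide ((k : Int) ≤ x)) := by
      rw [List.mem_filter]
      exact ⟨hjmem, by simp [hj]⟩
    obtain ⟨h, t, hht⟩ : ∃ h t, (quotePositions l).filter (fun x => decide ((k : Int) ≤ x)) = h :: t := by
      cases hcase : (quotePositions l).filter (fun x => decide ((k : Int) ≤ x)) with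
      | nil => rw [hcase] at hjfil; simp at hjfil
      | cons h t => exact ⟨h, t, rfl⟩
    have hpw : ((quotePositions l).filter (fun x => decide ((k : Int) ≤ x))).Pairwise (· < ·) :=
      (pairwise_qpos l).filter _
    have hhle : h ≤ (j : Int) := by
      rw [hht] at hjfil hpw
      rcases List.mem_cons.mp hjfil with heq | hmem
      · omega
      · exact le_of_lt (List.rel_of_pairwise_cons hpw hmem)
    have hhmem' : h ∈ (quotePositions l).filter (fun x => decide ((k : Int) ≤ x)) := by
      rw [hht]; exact List.mem_cons_self
    have hhQ := (List.mem_filter.mp hhmem').1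
    have hhk : (k : Int) ≤ h := of_decide_eq_true (List.mem_filter.mp hhmem').2
    obtain ⟨m, hmlt, rfl, hcm⟩ := mem_qpos.mp hhQ
    have hmk : k ≤ m := by exact_mod_cast hhk
    have hmj : m ≤ j := by exact_mod_cast hhle
    have hmeq : m = j := by
      by_contra hne
      have hlt : m - k < f.toNat := by omega
      apply hmin (m - k) hlt
      rw [List.drop_drop]
      have hkm' : k + (m - k) = m := by omega
      rw [hkm', List.drop_eq_getElem_cons hmlt, hcm]
      simp
    simp only [hht, List.headD_cons]
    rw [hmeq]
    simp [h0]; omega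

-- dropping the head of a ≥-filtered suffix of a strictly increasing list
theorem filter_ge_shift {xs : List Int} (hs : xs.Pairwise (· < ·)) {k a : Int} {r : List Int}
    (h : xs.filter (fun j => decide (k ≤ j)) = a :: r) :
    xs.filter (fun j => decide (a + 1 ≤ j)) = r := by
  induction xs with
  | nil => simp at h
  | cons x xs ih =>
    rw [List.pairwise_cons] at hs
    by_cases hkx : k ≤ x
    · rw [List.filter_cons_of_pos (by simp [hkx])] at h
      obtain ⟨rfl, hr⟩ : x = a ∧ xs.filter (fun j => decide (k ≤ j)) = r := by
        constructor <;> [exact (List.cons_eq_cons.mp h).1; exact (List.cons_eq_cons.mp h).2]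
      rw [List.filter_cons_of_neg (by simp)]
      rw [← hr]
      apply List.filter_congr
      intro y hy
      have := hs.1 y hy
      simp; omega
    · rw [List.filter_cons_of_neg (by simp [hkx])] at h
      have hxa : x < a + 1 := by
        have : a ∈ xs.filter (fun j => decide (k ≤ j)) := by rw [h]; exact List.mem_cons_self
        have := of_decide_eq_true (List.mem_filter.mp this).2
        omega
      rw [List.filter_cons_of_neg (by simp; omega)]
      exact ih hs.2 h

theorem qpos_nonneg {l : List Char} {x : Int} (hx : x ∈ quotePositions l) : 0 ≤ x := by
  obtain ⟨m, _, rfl, _⟩ := mem_qpos.mp hx; exact Int.natCast_nonneg m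

theorem quote_toList : ("\"" : String).toList = ['"'] := rfl

-- A's loop started at search position k computes B's pair scan of the ≥ k quote suffix.
theorem loop_eq (s : String) (i : Int) :
    ∀ (fuel k : Nat), k ≤ s.toList.length → s.toList.length + 1 ≤ k + fuel →
    vtLoopA s i fuel (PySem.Chars.findFrom s.toList ['"'] (k : Int))
        (PySem.Str.findFrom s "\"" (PySem.Chars.findFrom s.toList ['"'] (k : Int) + 1))
      = vtOutside i ((quotePositions s.toList).filter (fun j => decide ((k : Int) ≤ j))) := by
  intro fuel
  induction fuel with
  | zero => intro k hk hf; omega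
  | succ fuel ih =>
    intro k hk hf
    rw [findFrom_qpos s.toList k hk]
    cases hfil : (quotePositions s.toList).filter (fun j => decide ((k : Int) ≤ j)) with
    | nil =>
      simp [vtLoopA, vtOutside]
    | cons a t =>
      have haQ : a ∈ quotePositions s.toList := by
        have : a ∈ (quotePositions s.toList).filter (fun j => decide ((k : Int) ≤ j)) := by
          rw [hfil]; exact List.mem_cons_self
        exact (List.mem_filter.mp this).1
      have hka : ∀ x ∈ (a :: t : List Int), (k : Int) ≤ x := by
        intro x hx
        have : x ∈ (quotePositions s.toList).filter (fun j => decide ((k : Int) ≤ j)) := by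
          rw [hfil]; exact hx
        exact of_decide_eq_true (List.mem_filter.mp this).2
      obtain ⟨m, hmlt, rfl, _⟩ := mem_qpos.mp haQ
      have hkm : k ≤ m := by exact_mod_cast hka _ List.mem_cons_self
      have hshift : (quotePositions s.toList).filter (fun j => decide (((m : Int)) + 1 ≤ j)) = t :=
        filter_ge_shift (pairwise_qpos s.toList) hfil
      have hm1 : ((m : Int)) + 1 = ((m + 1 : Nat) : Int) := by push_cast; ring
      have hm1le : m + 1 ≤ s.toList.length := hmlt
      have hqe : PySem.Str.findFrom s "\"" ((m : Int) + 1)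
          = ((quotePositions s.toList).filter (fun j => decide (((m + 1 : Nat) : Int) ≤ j))).headD (-1) := by
        rw [PySem.Str.findFrom_eq, quote_toList, hm1, findFrom_qpos s.toList (m + 1) hm1le]
      cases t with
      | nil =>
        -- single unmatched quote: quote_end = -1, loop exits
        rw [hm1] at hshift
        simp only [List.headD_cons]
        rw [vtLoopA]
        rw [hqe, hshift]
        simp [vtOutside]
      | cons b r =>
        have hbt : b ∈ quotePositions s.toList := by
          have : b ∈ (quotePositions s.toList).filter (fun j => decide (((m : Int)) + 1 ≤ j)) := by
            rw [hshift]; exact List.mem_cons_self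
          exact (List.mem_filter.mp this).1
        obtain ⟨n, hnlt, rfl, _⟩ := mem_qpos.mp hbt
        have hmn : m < n := by
          have : ((m : Int)) + 1 ≤ (n : Int) := by
            have : (n : Int) ∈ (quotePositions s.toList).filter (fun j => decide (((m : Int)) + 1 ≤ j)) := by
              rw [hshift]; exact List.mem_cons_self
            exact of_decide_eq_true (List.mem_filter.mp this).2
          exact_mod_cast by omega
        simp only [List.headD_cons]
        rw [vtLoopA]
        rw [hqe]
        rw [hm1] at hshift
        rw [hshift]
        simp only [List.headD_cons]
        have hcond : ((m : Int)) ≠ -1 ∧ ((n : Int)) ≠ -1 := by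
          constructor <;> omega
        rw [if_pos hcond]
        by_cases hin : i > (m : Int) ∧ i < (n : Int)
        · rw [if_pos hin, vtOutside, if_pos ⟨hin.1, hin.2⟩]
        · rw [if_neg hin]
          have hn1 : ((n : Int)) + 1 = ((n + 1 : Nat) : Int) := by push_cast; ring
          have hn1le : n + 1 ≤ s.toList.length := hnlt
          have hqs' : PySem.Str.findFrom s "\"" ((n : Int) + 1)
              = PySem.Chars.findFrom s.toList ['"'] (((n + 1 : Nat) : Int)) := by
            rw [PySem.Str.findFrom_eq, quote_toList, hn1]
          have hshift2 : (quotePositions s.toList).filter (fun j => decide (((n + 1 : Nat) : Int) ≤ j)) = r := by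
            rw [← hn1]
            exact filter_ge_shift (pairwise_qpos s.toList) hshift
          have hrec := ih (n + 1) hn1le (by omega)
          rw [hshift2] at hrec
          simp only [hqs']
          rw [hrec, vtOutside]
          rw [if_neg (by exact fun h => hin ⟨h.1, h.2⟩)]

theorem filter_nonneg_qpos (l : List Char) :
    (quotePositions l).filter (fun j => decide (((0 : Nat) : Int) ≤ j)) = quotePositions l := by
  apply List.filter_eq_self.mpr
  intro x hx
  simp [qpos_nonneg hx]

-- ===== VERDICT (by name: the statement is the Claim_ definition above) =====
theorem valid_token_spec : Claim_equal_valid_token := by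
  intro substr statement _
  unfold Spec_valid_token
  show valid_token substr statement = valid_token_alt substr statement
  simp only [valid_token, valid_token_alt]
  by_cases hi : PySem.Str.find statement substr = -1
  · rw [if_pos hi, if_pos hi]
  · rw [if_neg hi, if_neg hi]
    by_cases hq : PySem.Str.find statement "\"" = -1
    · rw [if_pos hq]
      have h0 := findFrom_qpos statement.toList 0 (Nat.zero_le _)
      rw [filter_nonneg_qpos] at h0
      have hz : PySem.Chars.findFrom statement.toList ['"'] ((0 : Nat) : Int)
          = PySem.Chars.find statement.toList ['"'] := by
        simp [PySem.Chars.findFrom_zero]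
      rw [hz] at h0
      rw [PySem.Str.find_eq, quote_toList] at hq
      rw [hq] at h0
      cases hQ : quotePositions statement.toList with
      | nil => simp [vtOutside]
      | cons a t =>
        exfalso
        rw [hQ] at h0
        simp only [List.headD_cons] at h0
        have : 0 ≤ a := qpos_nonneg (by rw [hQ]; exact List.mem_cons_self)
        omega
    · rw [if_neg hq]
      have hz : PySem.Str.find statement "\"" = PySem.Chars.findFrom statement.toList ['"'] ((0 : Nat) : Int) := by
        rw [PySem.Str.find_eq, quote_toList]
        simp [PySem.Chars.findFrom_zero]
      rw [hz]
      have h := loop_eq statement (PySem.Str.find statement substr) (statement.toList.length + 1) 0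
        (Nat.zero_le _) (by omega)
      rw [filter_nonneg_qpos] at h
      exact h
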